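-- pv_equiv track=rewrite | github.com/manas-17045/LeetcodeSolutions | Leetcode 2201-2300/2223/2223_1.py | sumScores
-- ===== SOURCE A (Python) =====
-- def sumScores(s: str) -> int:
--     """
--     Calculates the sum of scores of all suffixes of a given string.
--     The score of a string is defined as the length of its longest common prefix with the original string.
--
--     Args:
--         s (str): The input string.
--     Returns:
--         int: The total sum of scores of all suffixes.
--     """
--     strLen = len(s)
--     if strLen == 0:
--         return 0
--
--     zArray = [0] * strLen
--     leftBound = 0
--     rightBound = 0
--
--     for i in range(1, strLen):
--         if i <= rightBound:
--             zArray[i] = min(rightBound - i + 1, zArray[i - leftBound])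
--
--         while i + zArray[i] < strLen and s[zArray[i]] == s[i + zArray[i]]:
--             zArray[i] += 1
--
--         if i + zArray[i] - 1 > rightBound:
--             leftBound = i
--             rightBound = i + zArray[i] - 1
--
--     totalScore = strLen + sum(zArray)
--     return totalScore
-- ===== SOURCE B (Python) =====
-- def sumScores(s: str) -> int:
--     n = len(s)
--     total = 0
--     for i in range(n):
--         k = 0
--         while i + k < n and s[k] == s[i + k]:
--             k += 1
--         total += k
--     return total
-- ===== Notes on version B (the rewrite author's own statement) =====
-- stated objective: simpler
-- what changed: Replaced the Z-algorithm (Z-box window with left/right bounds and a reusable Z-array) by the direct brute-force sum of longest-common-prefix lengths: for each suffix start i, count matching characters against the prefix and add the count.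
import Mathlib
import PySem

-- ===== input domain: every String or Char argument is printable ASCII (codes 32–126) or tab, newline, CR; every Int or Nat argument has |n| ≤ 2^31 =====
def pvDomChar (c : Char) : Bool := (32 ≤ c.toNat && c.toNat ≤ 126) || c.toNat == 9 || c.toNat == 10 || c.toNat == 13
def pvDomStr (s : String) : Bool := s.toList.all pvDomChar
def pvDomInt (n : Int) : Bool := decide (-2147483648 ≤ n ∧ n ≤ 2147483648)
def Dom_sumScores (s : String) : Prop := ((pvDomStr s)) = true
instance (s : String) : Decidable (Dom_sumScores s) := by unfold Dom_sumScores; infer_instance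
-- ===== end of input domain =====

-- B replaces the Z-algorithm by the plain brute-force sum of LCP lengths (simpler, not faster).

-- ===== PORT A =====

-- the inner `while` of A: extend zArray[i] while characters keep matching
def extendZ (cs : List Char) (i : Nat) (z : Nat) : Nat :=
  if h : i + z < cs.length ∧ cs[z]? = cs[i + z]? then extendZ cs i (z + 1) else z
termination_by cs.length - (i + z)
decreasing_by omega

-- one iteration of A's `for i in range(1, strLen)` loop; state = (zArray, leftBound, rightBound)
def zStep (cs : List Char) (st : List Nat × Nat × Nat) (i : Nat) : List Nat × Nat × Nat :=
  let z := st.1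
  let l := st.2.1
  let r := st.2.2
  let z0 := if i ≤ r then min (r - i + 1) (z.getD (i - l) 0) else z.getD i 0
  let zi := extendZ cs i z0
  let z' := z.set i zi
  if r < i + zi - 1 then (z', i, i + zi - 1) else (z', l, r)

def sumScores (s : String) : Int :=
  let cs := s.toList
  let n := cs.length
  if n = 0 then 0
  else
    let st := (List.range' 1 (n - 1)).foldl (zStep cs) (List.replicate n 0, 0, 0)
    (n : Int) + (st.1.sum : Nat)

-- ===== PORT B =====

-- B's inner `while`: count how many characters of the suffix at i match the prefix
def countMatch (cs : List Char) (i : Nat) (k : Nat) : Nat :=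
  if h : i + k < cs.length ∧ cs[k]? = cs[i + k]? then countMatch cs i (k + 1) else k
termination_by cs.length - (i + k)
decreasing_by omega

def sumScores_alt (s : String) : Int :=
  let cs := s.toList
  ((List.range cs.length).foldl (fun total i => total + countMatch cs i 0) 0 : Nat)

-- ===== PRECONDITION & SPEC =====
def Spec_sumScores (s : String) (out : Int) : Prop := out = sumScores_alt s
instance (s : String) (out : Int) : Decidable (Spec_sumScores s out) := by unfold Spec_sumScores; infer_instance

-- ===== CLAIM (what is proved, stated in full; the proofs are below) =====
def Claim_equal_sumScores : Prop := ∀ (s : String), Dom_sumScores s → Spec_sumScores s (sumScores s)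

-- ===== LEMMAS AND PROOFS =====

theorem extendZ_eq_countMatch (cs : List Char) (i z : Nat) :
    extendZ cs i z = countMatch cs i z := by
  fun_induction extendZ cs i z with
  | case1 z h ih => rw [countMatch]; simp [h, ih]
  | case2 z h => rw [countMatch]; simp [h]

theorem countMatch_le (cs : List Char) (i k : Nat) (h : i + k ≤ cs.length) :
    i + countMatch cs i k ≤ cs.length := by
  fun_induction countMatch cs i k with
  | case1 k h' ih => exact ih (by omega)
  | case2 k h' => exact h

-- every position below the final count matches
theorem countMatch_spec (cs : List Char) (i k : Nat) :
    ∀ j, k ≤ j → j < countMatch cs i k → i + j < cs.length ∧ cs[j]? = cs[i + j]? := by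
  fun_induction countMatch cs i k with
  | case1 k h ih =>
      intro j hkj hj
      rcases Nat.eq_or_lt_of_le hkj with rfl | hlt
      · exact h
      · exact ih j hlt hj
  | case2 k h => intro j hkj hj; omega

-- a start value known to match can be dropped to 0
theorem countMatch_from (cs : List Char) (i k : Nat)
    (h : ∀ j, j < k → i + j < cs.length ∧ cs[j]? = cs[i + j]?) :
    countMatch cs i k = countMatch cs i 0 := by
  induction k with
  | zero => rfl
  | succ k ih =>
      have hk := h k (by omega)
      have : countMatch cs i k = countMatch cs i (k + 1) := by
        rw [countMatch]; simp [hk.1, hk.2]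
      rw [← this, ih (fun j hj => h j (by omega))]

theorem countMatch_self (cs : List Char) (k : Nat) (h : k ≤ cs.length) :
    countMatch cs 0 k = cs.length := by
  fun_induction countMatch cs 0 k with
  | case1 k h' ih => exact ih (by omega)
  | case2 k h' =>
      rcases Nat.eq_or_lt_of_le h with heq | hlt
      · exact heq
      · exact absurd ⟨by omega, by rw [Nat.zero_add]⟩ h'

def ZInv (cs : List Char) (i : Nat) (st : List Nat × Nat × Nat) : Prop :=
  st.1.length = cs.length ∧ st.2.1 < i ∧ st.2.2 < cs.length ∧
  (∀ k, st.2.1 + k ≤ st.2.2 → cs[k]? = cs[st.2.1 + k]?) ∧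
  (∀ j, j < i → j ≠ 0 → st.1.getD j 0 = countMatch cs j 0) ∧
  (∀ j, (j = 0 ∨ i ≤ j) → st.1.getD j 0 = 0)

theorem getD_set_self (z : List Nat) (i v : Nat) (h : i < z.length) :
    (z.set i v).getD i 0 = v := by
  simp [List.getD, List.getElem?_set_self h]

theorem getD_set_ne (z : List Nat) (i j v : Nat) (h : j ≠ i) :
    (z.set i v).getD j 0 = z.getD j 0 := by
  simp [List.getD, List.getElem?_set_ne (Ne.symm h)]

theorem zStep_inv (cs : List Char) (i : Nat) (st : List Nat × Nat × Nat)
    (hi1 : 1 ≤ i) (hin : i < cs.length) (hinv : ZInv cs i st) :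
    ZInv cs (i + 1) (zStep cs st i) := by
  obtain ⟨z, l, r⟩ := st
  obtain ⟨hlen, hl, hr, hbox, hstored, hzero⟩ := hinv
  simp only [ZInv] at *
  unfold zStep
  simp only
  set z0 := if i ≤ r then min (r - i + 1) (z.getD (i - l) 0) else z.getD i 0 with hz0
  -- the start value z0 is a valid partial match and fits in the string
  have hpre : ∀ j, j < z0 → i + j < cs.length ∧ cs[j]? = cs[i + j]? := by
    intro j hj
    rw [hz0] at hj
    by_cases hir : i ≤ r
    · simp only [if_pos hir] at hj
      by_cases hli : l = 0
      · subst hli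
        simp only [Nat.sub_zero, hzero i (Or.inr (Nat.le_refl i))] at hj
        omega
      · have hil1 : 1 ≤ i - l := by omega
        have hilv : z.getD (i - l) 0 = countMatch cs (i - l) 0 :=
          hstored (i - l) (by omega) (by omega)
        rw [hilv] at hj
        have hjc := countMatch_spec cs (i - l) 0 j (by omega) (by omega)
        have hikr : i + j ≤ r := by omega
        have hbx := hbox ((i - l) + j) (by omega)
        have hll : l + ((i - l) + j) = i + j := by omega
        rw [hll] at hbx
        exact ⟨by omega, hjc.2.trans hbx⟩
    · simp only [if_neg hir] at hj
      rw [hzero i (Or.inr (Nat.le_refl i))] at hj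
      omega
  have hz0le : i + z0 ≤ cs.length := by
    rw [hz0]; by_cases hir : i ≤ r
    · rw [if_pos hir]; omega
    · rw [if_neg hir, hzero i (Or.inr (Nat.le_refl i))]; omega
  have hzi : extendZ cs i z0 = countMatch cs i 0 := by
    rw [extendZ_eq_countMatch, countMatch_from cs i z0 hpre]
  set zi := extendZ cs i z0 with hzidef
  have hzival : zi = countMatch cs i 0 := hzi
  have hzile : i + zi ≤ cs.length := by
    rw [hzidef, extendZ_eq_countMatch]; exact countMatch_le cs i z0 hz0le
  have hsetlen : (z.set i zi).length = cs.length := by simp [hlen]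
  have hstored' : ∀ j, j < i + 1 → j ≠ 0 → (z.set i zi).getD j 0 = countMatch cs j 0 := by
    intro j hj hj0
    by_cases hji : j = i
    · subst hji; rw [getD_set_self z j zi (by omega), hzival]
    · rw [getD_set_ne z i j zi hji]; exact hstored j (by omega) hj0
  have hzero' : ∀ j, (j = 0 ∨ i + 1 ≤ j) → (z.set i zi).getD j 0 = 0 := by
    intro j hj
    rw [getD_set_ne z i j zi (by omega)]
    exact hzero j (by omega)
  by_cases hup : r < i + zi - 1
  · simp only [if_pos hup]
    refine ⟨hsetlen, by omega, by omega, ?_, hstored', hzero'⟩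
    intro k hk
    have hkzi : k < countMatch cs i 0 := by rw [← hzival]; omega
    exact (countMatch_spec cs i 0 k (Nat.zero_le k) hkzi).2
  · simp only [if_neg hup]
    exact ⟨hsetlen, by omega, hr, hbox, hstored', hzero'⟩

theorem loop_inv (cs : List Char) : ∀ (cnt i : Nat) (st : List Nat × Nat × Nat),
    1 ≤ i → i + cnt ≤ cs.length → ZInv cs i st →
    ZInv cs (i + cnt) ((List.range' i cnt).foldl (zStep cs) st) := by
  intro cnt
  induction cnt with
  | zero => intro i st _ _ h; simpa using h
  | succ cnt ih =>
      intro i st hi1 hcnt hinv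
      rw [List.range'_succ, List.foldl_cons]
      have h1 := zStep_inv cs i st hi1 (by omega) hinv
      have := ih (i + 1) (zStep cs st i) (by omega) (by omega) h1
      simpa [Nat.add_assoc, Nat.add_comm 1 cnt] using this

theorem getD_replicate (n j : Nat) : (List.replicate n (0 : Nat)).getD j 0 = 0 := by
  by_cases h : j < n
  · simp [List.getD, h]
  · simp [List.getD, h]

theorem foldl_add_eq_sum_map (cs : List Char) (l : List Nat) (a : Nat) :
    l.foldl (fun total i => total + countMatch cs i 0) a
      = a + (l.map (fun i => countMatch cs i 0)).sum := by
  induction l generalizing a with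
  | nil => simp
  | cons x xs ih => simp [ih]; omega

-- the list z with the final invariant is exactly the map of LCP values (0 at index 0)
theorem final_list_eq (cs : List Char) (z : List Nat)
    (hlen : z.length = cs.length)
    (hstored : ∀ j, j < cs.length → j ≠ 0 → z.getD j 0 = countMatch cs j 0)
    (hzero0 : z.getD 0 0 = 0) :
    z = (List.range cs.length).map
        (fun j => if j = 0 then 0 else countMatch cs j 0) := by
  apply List.ext_getElem
  · simp [hlen]
  · intro j h1 h2
    simp only [List.getElem_map, List.getElem_range]
    have hj : j < cs.length := by simpa [hlen] using h1
    have hjD : z[j] = z.getD j 0 := by simp [List.getD, List.getElem?_eq_getElem h1]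
    rw [hjD]
    by_cases hj0 : j = 0
    · subst hj0; simpa [List.getD] using hzero0
    · simpa [List.getD, hj0] using hstored j hj hj0

theorem sum_shift (cs : List Char) (h : 0 < cs.length) :
    cs.length + ((List.range cs.length).map
        (fun j => if j = 0 then 0 else countMatch cs j 0)).sum
    = ((List.range cs.length).map (fun j => countMatch cs j 0)).sum := by
  obtain ⟨m, hm⟩ : ∃ m, cs.length = m + 1 := ⟨cs.length - 1, by omega⟩
  have hL0 : countMatch cs 0 0 = cs.length := countMatch_self cs 0 (by omega)
  have hcongr : (List.range' 1 m).map
      (fun j => if j = 0 then 0 else countMatch cs j 0)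
      = (List.range' 1 m).map (fun j => countMatch cs j 0) := by
    apply List.map_congr_left
    intro x hx
    have hx1 : 1 ≤ x := (List.mem_range'_1.mp hx).1
    simp [show x ≠ 0 by omega]
  rw [List.range_eq_range', hm, List.range'_succ]
  simp only [List.map_cons, List.sum_cons]
  rw [hcongr, hL0, hm]
  simp

-- ===== VERDICT (by name: the statement is the Claim_ definition above) =====
theorem sumScores_spec : Claim_equal_sumScores := by
  intro s _
  unfold Spec_sumScores sumScores sumScores_alt
  set cs := s.toList with hcs
  by_cases h0 : cs.length = 0
  · simp [h0]
  · have hpos : 0 < cs.length := by omega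
    simp only [if_neg h0]
    have hinit : ZInv cs 1 (List.replicate cs.length 0, 0, 0) := by
      refine ⟨by simp, Nat.zero_lt_one, hpos, ?_, ?_, ?_⟩
      · intro k hk
        have hk' : 0 + k ≤ 0 := hk
        have : k = 0 := by omega
        subst this; rfl
      · intro j hj hj0
        have hj' : j < 1 := hj
        omega
      · intro j _; exact getD_replicate cs.length j
    have hfin := loop_inv cs (cs.length - 1) 1 (List.replicate cs.length 0, 0, 0)
      (by omega) (by omega) hinit
    have h1n : 1 + (cs.length - 1) = cs.length := by omega
    rw [h1n] at hfin
    obtain ⟨hlen, _, _, _, hstored, hzero⟩ := hfin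
    set st := (List.range' 1 (cs.length - 1)).foldl (zStep cs) (List.replicate cs.length 0, 0, 0)
    have hz := final_list_eq cs st.1 hlen
      (fun j hj hj0 => hstored j hj hj0) (hzero 0 (Or.inl rfl))
    rw [foldl_add_eq_sum_map, hz]
    have hkey : cs.length + ((List.range cs.length).map
        (fun j => if j = 0 then 0 else countMatch cs j 0)).sum
        = 0 + ((List.range cs.length).map (fun i => countMatch cs i 0)).sum := by
      have := sum_shift cs hpos; omega
    exact_mod_cast hkey
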